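-- pv_equiv track=rewrite | github.com/Melodiz/dailycode | HSE/ADS_contests/Sorting/task_D.py | counter_sorted_by_keys
-- ===== SOURCE A (Python) =====
-- def merge(arr1, arr2):
--     l, r = 0, 0
--     result = []
--     while l < len(arr1) and r < len(arr2):
--         if arr1[l] <= arr2[r]:
--             result.append(arr1[l])
--             l += 1
--         else:
--             result.append(arr2[r])
--             r += 1
--     if l >= len(arr1):
--         return result + arr2[r:]
--     return result + arr1[l:]
--
-- def merge_sort(arr):
--     n = len(arr)
--     if n <= 1:
--         return arr
--     else:
--         left_half = merge_sort(arr[:n//2])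
--         right_half = merge_sort(arr[n//2:])
--         return merge(left_half, right_half)
--
-- def counter_sorted_by_keys(arr):
--     # it's just collections.Counter which is sorted by keys
--     # I've implement it, because I'm not sure if we allowed to use it
--     letters = merge_sort(list(set(arr)))
--     result = {}
--     for key in letters:
--         result[key] = 0
--     for el in arr:
--         result[el] += 1
--     return result
-- ===== SOURCE B (Python) =====
-- def counter_sorted_by_keys(arr):
--     # B: one counting pass into a plain dict, then rebuild sorted by key (simpler: no merge sort, no zero-init pass)
--     counts = {}
--     for el in arr:
--         counts[el] = counts.get(el, 0) + 1
--     return {k: counts[k] for k in sorted(counts)}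
-- ===== Notes on version B (the rewrite author's own statement) =====
-- stated objective: simpler
-- what changed: B counts in one pass into a plain dict and then emits keys via the built-in sort, replacing A's hand-written merge sort over set(arr), a zero-initialization pass and a second counting pass.
import Mathlib
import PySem

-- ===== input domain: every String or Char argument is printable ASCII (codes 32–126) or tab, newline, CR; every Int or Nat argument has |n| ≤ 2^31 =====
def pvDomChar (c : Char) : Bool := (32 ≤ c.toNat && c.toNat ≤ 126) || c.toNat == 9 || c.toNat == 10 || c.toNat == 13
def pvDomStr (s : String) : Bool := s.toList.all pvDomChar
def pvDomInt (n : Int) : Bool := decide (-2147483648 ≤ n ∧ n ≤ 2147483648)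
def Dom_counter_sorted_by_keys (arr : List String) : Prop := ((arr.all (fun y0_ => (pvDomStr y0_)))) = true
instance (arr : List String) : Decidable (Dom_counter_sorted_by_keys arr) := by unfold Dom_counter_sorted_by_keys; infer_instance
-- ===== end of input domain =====

-- B replaces A's hand-written merge sort + zero-init + count passes by one counting pass and a library sort (objective: simpler).

-- ===== PORT A =====
-- the while-loop of merge: acc is `result`, the two lists are the unread suffixes arr1[l:], arr2[r:]
def pvMergeGo : List String → List String → List String → List String
  | acc, x :: xs, y :: ys =>
      if x ≤ y then pvMergeGo (acc ++ [x]) xs (y :: ys)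
      else pvMergeGo (acc ++ [y]) (x :: xs) ys
  | acc, [], ys => acc ++ ys      -- l >= len(arr1): result + arr2[r:]
  | acc, xs, [] => acc ++ xs      -- else: result + arr1[l:]

def pvMerge (arr1 arr2 : List String) : List String := pvMergeGo [] arr1 arr2

-- arr[:n//2] / arr[n//2:] with 0 ≤ n//2 ≤ n are List.take/drop (exact here)
def pvMergeSort (arr : List String) : List String :=
  let n := arr.length
  if n ≤ 1 then arr
  else pvMerge (pvMergeSort (arr.take (n / 2))) (pvMergeSort (arr.drop (n / 2)))
termination_by arr.length
decreasing_by
  · simp only [List.length_take]; omega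
  · simp only [List.length_drop]; omega

def counter_sorted_by_keys (arr : List String) : List (String × Int) :=
  let letters := pvMergeSort (PySem.Set.ofList arr)
  let result := letters.foldl (fun d k => d.insert k 0) PySem.Dict.empty
  -- result[el] += 1; KeyError impossible: every el ∈ arr is in letters, so modify is exact
  let result := arr.foldl (fun d el => d.modify el 0 (· + 1)) result
  result.items

-- ===== PORT B =====
def counter_sorted_by_keys_alt (arr : List String) : List (String × Int) :=
  let counts := arr.foldl (fun d el => d.insert el (d.getD el 0 + 1)) PySem.Dict.empty
  (PySem.List.sorted counts.keys (fun k => k) false).map (fun k => (k, counts.getD k 0))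

-- ===== PRECONDITION & SPEC =====
def Spec_counter_sorted_by_keys (arr : List String) (out : List (String × Int)) : Prop := out = counter_sorted_by_keys_alt arr
instance (arr : List String) (out : List (String × Int)) : Decidable (Spec_counter_sorted_by_keys arr out) := by unfold Spec_counter_sorted_by_keys; infer_instance

-- ===== CLAIM (what is proved, stated in full; the proofs are below) =====
def Claim_equal_counter_sorted_by_keys : Prop := ∀ (arr : List String), Dom_counter_sorted_by_keys arr → Spec_counter_sorted_by_keys arr (counter_sorted_by_keys arr)

-- ===== LEMMAS AND PROOFS =====

-- the accumulator loop of A's merge is core List.merge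
lemma pvMergeGo_eq (xs ys acc : List String) :
    pvMergeGo acc xs ys = acc ++ List.merge xs ys (fun a b => decide (a ≤ b)) := by
  induction xs generalizing ys acc with
  | nil => cases ys <;> simp [pvMergeGo]
  | cons x xs ih =>
    induction ys generalizing acc with
    | nil => simp [pvMergeGo]
    | cons y ys ihy =>
      simp only [pvMergeGo, List.merge]
      by_cases h : x ≤ y
      · simp [h, ih]
      · simp [h, ihy]

lemma pvMergeSort_perm (l : List String) : (pvMergeSort l).Perm l := by
  rw [pvMergeSort]
  by_cases h : l.length ≤ 1
  · simp [h]
  · simp only [h, if_false]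
    have h1 := pvMergeSort_perm (l.take (l.length / 2))
    have h2 := pvMergeSort_perm (l.drop (l.length / 2))
    rw [pvMerge, pvMergeGo_eq, List.nil_append]
    exact (List.merge_perm_append _).trans
      ((h1.append h2).trans (List.Perm.of_eq (List.take_append_drop _ _)))
termination_by l.length
decreasing_by
  · simp only [List.length_take]; omega
  · simp only [List.length_drop]; omega

lemma pvMergeSort_pairwise (l : List String) :
    (pvMergeSort l).Pairwise (· ≤ ·) := by
  rw [pvMergeSort]
  by_cases h : l.length ≤ 1
  · simp only [h, if_true]
    match l, h with
    | [], _ => simp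
    | [a], _ => simp
  · simp only [h, if_false]
    have h1 := pvMergeSort_pairwise (l.take (l.length / 2))
    have h2 := pvMergeSort_pairwise (l.drop (l.length / 2))
    rw [pvMerge, pvMergeGo_eq, List.nil_append]
    have := List.pairwise_merge (le := fun a b : String => decide (a ≤ b))
      (fun a b c hab hbc => by simp_all; exact le_trans hab hbc)
      (fun a b => by simpa using le_total a b)
      _ _ (by simpa using h1) (by simpa using h2)
    simpa using this
termination_by l.length
decreasing_by
  · simp only [List.length_take]; omega
  · simp only [List.length_drop]; omega

-- A's merge sort of a duplicate-free list IS Python's sorted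
lemma pvMergeSort_eq_sorted (l : List String) (hnd : l.Nodup) :
    pvMergeSort l = PySem.List.sorted l (fun k => k) false := by
  refine (PySem.List.sorted_eq_of_perm_of_pairwise_lt l (pvMergeSort l) (fun k => k)
    (pvMergeSort_perm l) ?_).symm
  have hnd' : (pvMergeSort l).Nodup := ((pvMergeSort_perm l).nodup_iff).mpr hnd
  have hne : (pvMergeSort l).Pairwise (· ≠ ·) := hnd'
  exact ((pvMergeSort_pairwise l).and hne).imp (fun h => lt_of_le_of_ne h.1 h.2)

-- Set.update adds nothing when every element is already present
lemma set_update_of_subset (s : PySem.Set String) (l : List String)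
    (h : ∀ x ∈ l, x ∈ s) : PySem.Set.update s l = s := by
  rw [PySem.Set.update_eq_append_filter]
  have hnil : List.filter (fun y => !s.contains y) (PySem.Set.ofList l) = [] :=
    List.filter_eq_nil_iff.mpr (fun y hy => by
      simp [h y ((PySem.Set.mem_ofList l y).mp hy)])
  rw [hnil, List.append_nil]

-- ===== VERDICT (by name: the statement is the Claim_ definition above) =====
theorem counter_sorted_by_keys_spec : Claim_equal_counter_sorted_by_keys := by
  intro arr _
  show counter_sorted_by_keys arr = counter_sorted_by_keys_alt arr
  -- name the common pieces
  have hndset : (PySem.Set.ofList arr).Nodup := PySem.Set.nodup_ofList arr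
  set letters := pvMergeSort (PySem.Set.ofList arr) with hlet
  have hlsort : letters = PySem.List.sorted (PySem.Set.ofList arr) (fun k => k) false :=
    pvMergeSort_eq_sorted _ hndset
  have hndl : letters.Nodup := ((pvMergeSort_perm _).nodup_iff).mpr hndset
  have hmeml : ∀ x ∈ arr, x ∈ letters := by
    intro x hx
    exact ((pvMergeSort_perm _).mem_iff).mpr ((PySem.Set.mem_ofList arr x).mpr hx)
  -- B side: the counting loop is Counter(arr)
  have hB : counter_sorted_by_keys_alt arr
      = (PySem.List.sorted (PySem.Set.ofList arr) (fun k => k) false).map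
          (fun k => (k, (arr.count k : Int))) := by
    simp only [counter_sorted_by_keys_alt, PySem.Dict.foldl_insert_getD_add_one_eq_counter,
      PySem.Dict.keys_counter, PySem.Dict.getD_counter]
  -- A side
  have hd0 : (letters.foldl (fun d k => d.insert k (0 : Int)) PySem.Dict.empty).items
      = letters.map (fun k => (k, (0 : Int))) := by
    have := PySem.Dict.items_foldl_insert_fresh (l := letters) (k := fun a => a)
      (v := fun _ => (0 : Int)) (d := PySem.Dict.empty)
      (by intro a _; simp [PySem.Dict.contains_empty]) (by simpa using hndl)
    simpa using this
  set d0 := letters.foldl (fun d k => d.insert k (0 : Int)) PySem.Dict.empty with hd0def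
  set fin := arr.foldl (fun d el => d.modify el 0 (· + 1)) d0 with hfin
  have hkeys0 : d0.keys = letters := by
    rw [hd0def, PySem.Dict.keys_foldl_insert]
    simp only [PySem.Dict.keys_empty]
    rw [show PySem.Set.update ([] : PySem.Set String) letters = PySem.Set.ofList letters from rfl]
    exact PySem.Set.ofList_eq_self_of_nodup letters hndl
  have hkeysF : fin.keys = letters := by
    rw [hfin, PySem.Dict.keys_foldl_modify, hkeys0]
    exact set_update_of_subset _ _ hmeml
  have hgetF : ∀ k ∈ letters, fin.getD k 0 = (arr.count k : Int) := by
    intro k hk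
    rw [hfin, PySem.Dict.getD_foldl_modify_add_one]
    have h0 : d0.getD k 0 = 0 :=
      PySem.Dict.getD_of_mem_items d0 (by rw [hd0]; exact List.mem_map.mpr ⟨k, hk, rfl⟩)
        (by rw [hkeys0]; exact hndl) 0
    rw [h0]; ring
  have hA : counter_sorted_by_keys arr = letters.map (fun k => (k, (arr.count k : Int))) := by
    show fin.items = _
    rw [PySem.Dict.items_eq_map_keys fin (by rw [hkeysF]; exact hndl) 0, hkeysF]
    exact List.map_congr_left (fun k hk => by rw [hgetF k hk])
  rw [hA, hB, hlsort]
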